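-- pv_equiv track=rewrite | github.com/Nayan-Srivastava/DSA | Pattern Practice Questions/Sandglass Pattern.py | sandglass_pattern
-- ===== SOURCE A (Python) =====
-- def sandglass_pattern(n):
--     pattern = []
--     # Upper part (including middle row)
--     for i in range(n):
--         stars = '*' * (2 * (n - i) - 1)
--         row = stars.center(2 * n - 1)
--         pattern.append(row)
--     # Lower part (mirror, excluding middle row)
--     for i in range(1, n):
--         stars = '*' * (2 * i + 1)
--         row = stars.center(2 * n - 1)
--         pattern.append(row)
--     return pattern
-- ===== SOURCE B (Python) =====
-- def sandglass_pattern(n):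
--     upper = [' ' * i + '*' * (2 * (n - i) - 1) + ' ' * i for i in range(n)]
--     return upper + list(reversed(upper[:-1]))
-- ===== Notes on version B (the rewrite author's own statement) =====
-- stated objective: simpler
-- what changed: Builds each upper-half row directly by explicit padding in one loop and obtains the lower half by mirroring the computed upper half (reversed(upper[:-1])), instead of A's two independent arithmetic loops with str.center.
import Mathlib
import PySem

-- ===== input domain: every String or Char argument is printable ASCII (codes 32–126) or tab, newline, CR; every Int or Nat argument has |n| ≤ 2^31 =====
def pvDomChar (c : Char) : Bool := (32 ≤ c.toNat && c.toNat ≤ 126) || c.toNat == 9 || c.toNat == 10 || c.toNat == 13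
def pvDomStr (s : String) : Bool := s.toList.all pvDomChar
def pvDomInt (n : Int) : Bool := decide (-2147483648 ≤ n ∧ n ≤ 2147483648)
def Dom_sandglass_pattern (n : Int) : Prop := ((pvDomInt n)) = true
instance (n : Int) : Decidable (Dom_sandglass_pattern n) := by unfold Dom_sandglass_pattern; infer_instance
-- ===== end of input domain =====

-- B builds each row by explicit padding in one loop and mirrors the upper half, instead of
-- A's two arithmetic loops through str.center; return values proved equal for every n.

-- ===== PORT A =====
-- str.center(width) hand-ported exactly per CPython: left = marg//2 + (marg & width & 1);
-- 'marg & width & 1' is 1 iff marg and width are both odd (rendered as the parity test) — exact.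
def pyCenter (s : List Char) (width : Int) : List Char :=
  if width ≤ (s.length : Int) then s
  else
    let marg := width - (s.length : Int)
    let left := PySem.Int.floordiv marg 2 +
      (if PySem.Int.mod marg 2 = 1 ∧ PySem.Int.mod width 2 = 1 then 1 else 0)
    List.replicate left.toNat ' ' ++ s ++ List.replicate (marg - left).toNat ' '

def sandglass_pattern (n : Int) : List String :=
  let pattern : List String :=
    (PySem.List.pyRange 0 n 1).foldl (fun pat i =>
      let stars := PySem.List.pyRepeat ['*'] (2 * (n - i) - 1)
      pat ++ [String.ofList (pyCenter stars (2 * n - 1))]) []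
  (PySem.List.pyRange 1 n 1).foldl (fun pat i =>
    let stars := PySem.List.pyRepeat ['*'] (2 * i + 1)
    pat ++ [String.ofList (pyCenter stars (2 * n - 1))]) pattern

-- ===== PORT B =====
def sandglass_pattern_alt (n : Int) : List String :=
  let upper := (PySem.List.pyRange 0 n 1).map (fun i =>
    String.ofList (PySem.List.pyRepeat [' '] i ++ PySem.List.pyRepeat ['*'] (2 * (n - i) - 1)
      ++ PySem.List.pyRepeat [' '] i))
  upper ++ (PySem.List.slice upper none (some (-1))).reverse

-- ===== PRECONDITION & SPEC =====
def Spec_sandglass_pattern (n : Int) (out : List String) : Prop := out = sandglass_pattern_alt n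
instance (n : Int) (out : List String) : Decidable (Spec_sandglass_pattern n out) := by unfold Spec_sandglass_pattern; infer_instance

-- ===== CLAIM (what is proved, stated in full; the proofs are below) =====
def Claim_equal_sandglass_pattern : Prop := ∀ (n : Int), Dom_sandglass_pattern n → Spec_sandglass_pattern n (sandglass_pattern n)

-- ===== LEMMAS AND PROOFS =====

-- B's row function
def pvRow (n i : Int) : String :=
  String.ofList (PySem.List.pyRepeat [' '] i ++ PySem.List.pyRepeat ['*'] (2 * (n - i) - 1)
    ++ PySem.List.pyRepeat [' '] i)

-- centering the row of width 2*(n-i)-1 in total width 2*n-1 pads i blanks on each side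
lemma pvCenter_row (n i : Int) (h0 : 0 ≤ i) (h : i < n) :
    pyCenter (PySem.List.pyRepeat ['*'] (2 * (n - i) - 1)) (2 * n - 1)
      = PySem.List.pyRepeat [' '] i ++ PySem.List.pyRepeat ['*'] (2 * (n - i) - 1)
        ++ PySem.List.pyRepeat [' '] i := by
  have hlen : (((PySem.List.pyRepeat ['*'] (2 * (n - i) - 1)).length : Int)) = 2 * (n - i) - 1 := by
    simp [PySem.List.pyRepeat_singleton]; omega
  rcases eq_or_lt_of_le h0 with h1 | h1
  · -- i = 0: the row already has full width, center returns it unchanged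
    subst h1
    unfold pyCenter
    rw [if_pos (by rw [hlen]; omega)]
    simp [PySem.List.pyRepeat_singleton]
  · -- 0 < i: margin is 2*i (even), so i blanks go on each side
    unfold pyCenter
    rw [if_neg (by rw [hlen]; omega)]
    rw [hlen]
    have hmod : PySem.Int.mod (2 * n - 1 - (2 * (n - i) - 1)) 2 = 0 := by
      rw [PySem.Int.mod_eq_zero_iff_dvd]; exact ⟨i, by ring⟩
    have hdiv : PySem.Int.floordiv (2 * n - 1 - (2 * (n - i) - 1)) 2 = i := by
      rw [PySem.Int.floordiv_eq_ediv_of_pos (by norm_num)]; omega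
    simp only [hmod, hdiv]
    rw [if_neg (by omega)]
    simp [PySem.List.pyRepeat_singleton]
    omega

-- the mirrored index range: [1, n) mapped through n-1-i is [0, n-1) reversed
lemma pvMirror_range (n : Int) :
    (PySem.List.pyRange 1 n 1).map (fun i => (n - 1 - i)) = (PySem.List.pyRange 0 (n-1) 1).reverse := by
  have h := PySem.List.pyRange_neg_one_eq_reverse (n-2) (-1)
  have e1 : (-1 : Int) + 1 = 0 := by ring
  have e2 : n - 2 + 1 = n - 1 := by ring
  rw [e1, e2] at h
  rw [← h, PySem.List.pyRange_neg_one, PySem.List.pyRange_one]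
  rw [List.map_map]
  have e3 : n - 2 - (-1) = n - 1 := by ring
  rw [e3]
  apply List.map_congr_left
  intro k _
  simp; ring

-- ===== VERDICT (by name: the statement is the Claim_ definition above) =====
-- A's second loop at i produces exactly B's upper row at index n-1-i
lemma pvLower_row (n i : Int) (h1 : 1 ≤ i) (h2 : i < n) :
    String.ofList (pyCenter (PySem.List.pyRepeat ['*'] (2 * i + 1)) (2 * n - 1)) = pvRow n (n - 1 - i) := by
  have e : 2 * i + 1 = 2 * (n - (n - 1 - i)) - 1 := by ring
  rw [e, pvRow]
  exact congrArg String.ofList (pvCenter_row n (n - 1 - i) (by omega) (by omega))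

theorem sandglass_pattern_spec : Claim_equal_sandglass_pattern := by
  intro n _
  unfold Spec_sandglass_pattern sandglass_pattern sandglass_pattern_alt
  simp only [PySem.List.foldl_append_singleton_eq_map, List.nil_append, PySem.List.slice_to_neg_one]
  have h1 : (PySem.List.pyRange 0 n 1).map
      (fun i => String.ofList (pyCenter (PySem.List.pyRepeat ['*'] (2 * (n - i) - 1)) (2 * n - 1)))
      = (PySem.List.pyRange 0 n 1).map (fun i =>
        String.ofList (PySem.List.pyRepeat [' '] i ++ PySem.List.pyRepeat ['*'] (2 * (n - i) - 1)
          ++ PySem.List.pyRepeat [' '] i)) := by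
    apply List.map_congr_left
    intro i hi
    obtain ⟨ha, hb⟩ := PySem.List.mem_pyRange_one.mp hi
    exact congrArg String.ofList (pvCenter_row n i ha hb)
  rw [h1]
  congr 1
  by_cases hn : n ≤ 0
  · rw [PySem.List.pyRange_one_eq_nil (by omega : n ≤ 1), PySem.List.pyRange_one_eq_nil hn]
    simp
  · have hsplit := PySem.List.pyRange_one_succ_right (a := 0) (b := n - 1) (by omega)
    have e : n - 1 + 1 = n := by ring
    rw [e] at hsplit
    rw [hsplit, List.map_append, List.map_singleton, List.dropLast_concat]
    have h2 : (PySem.List.pyRange 1 n 1).map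
        (fun i => String.ofList (pyCenter (PySem.List.pyRepeat ['*'] (2 * i + 1)) (2 * n - 1)))
        = ((PySem.List.pyRange 1 n 1).map (fun i => n - 1 - i)).map (fun j => pvRow n j) := by
      rw [List.map_map]
      apply List.map_congr_left
      intro i hi
      obtain ⟨ha, hb⟩ := PySem.List.mem_pyRange_one.mp hi
      exact pvLower_row n i ha hb
    rw [h2, pvMirror_range, ← List.map_reverse]
    rfl
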